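-- pv_equiv track=rewrite | github.com/canonical/charmcraft | charmcraft/jujuignore.py | _rstrip_unescaped
-- ===== SOURCE A (Python) =====
-- def _rstrip_unescaped(rule):
--     """Remove trailing whitespace that isn't escaped."""
--     i = len(rule) - 1
--     last = len(rule)
--     while i >= 0:
--         if rule[i] == '\n' or rule[i] == '\r':
--             last = i
--         elif rule[i] != ' ':
--             break
--         elif i == 0 or rule[i - 1] != '\\':
--             last = i
--         i -= 1
--     rule = rule[:last]
--     return rule
-- ===== SOURCE B (Python) =====
-- def _rstrip_unescaped(rule):
--     """Remove trailing whitespace that isn't escaped."""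
--     keep = 0
--     prev = None
--     for i, c in enumerate(rule):
--         if c not in ' \r\n' or (c == ' ' and prev == '\\'):
--             keep = i + 1
--         prev = c
--     return rule[:keep]
-- ===== Notes on version B (the rewrite author's own statement) =====
-- stated objective: alternative
-- what changed: Replaced the backward while-loop with last/break index bookkeeping by a single forward pass that tracks the previous character and records keep = i+1 at each character that must be kept (non-whitespace or backslash-escaped space), then slices to keep.
import Mathlib
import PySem

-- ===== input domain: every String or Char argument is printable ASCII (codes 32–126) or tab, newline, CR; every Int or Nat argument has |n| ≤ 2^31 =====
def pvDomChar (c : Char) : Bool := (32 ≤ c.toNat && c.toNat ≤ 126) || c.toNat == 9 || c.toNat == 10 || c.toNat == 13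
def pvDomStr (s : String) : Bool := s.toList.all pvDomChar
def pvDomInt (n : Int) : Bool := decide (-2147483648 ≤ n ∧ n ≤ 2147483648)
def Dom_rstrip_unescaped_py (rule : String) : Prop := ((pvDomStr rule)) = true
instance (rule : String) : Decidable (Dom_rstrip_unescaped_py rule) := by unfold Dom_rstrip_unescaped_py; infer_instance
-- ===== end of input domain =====

-- B replaces A's backward scan (indices i and last, early break) by one forward pass
-- recording the end of the rightmost character that must be kept; same return value, no side effects.

-- ===== PORT A =====
-- A's while loop, i counting down; the first Nat argument is i+1 (so 0 means i = -1, loop over).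
-- rule[i] and rule[i-1] are always in range when read (0 ≤ i-1 < i < len), so getD is exact there.
def rstripLoopA : List Char → Nat → Nat → Nat
  | _, 0, last => last
  | s, (i+1), last =>
    if s.getD i ' ' = '\n' ∨ s.getD i ' ' = '\r' then rstripLoopA s i i
    else if s.getD i ' ' ≠ ' ' then last
    else if i = 0 ∨ s.getD (i-1) ' ' ≠ '\\' then rstripLoopA s i i
    else rstripLoopA s i last

-- rule[:last] with 0 ≤ last ≤ len(rule) is exactly List.take last.
def rstrip_unescaped_py (rule : String) : String :=
  let s := rule.toList
  String.mk (s.take (rstripLoopA s s.length s.length))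

-- ===== PORT B =====
-- B's for loop over (i, c) with prev = previous character (None before the first).
def altLoop : List Char → Nat → Option Char → Nat → Nat
  | [], _, _, keep => keep
  | c :: rest, i, prev, keep =>
    altLoop rest (i + 1) (some c)
      (if (c ≠ ' ' ∧ c ≠ '\r' ∧ c ≠ '\n') ∨ (c = ' ' ∧ prev = some '\\') then i + 1 else keep)

def rstrip_unescaped_py_alt (rule : String) : String :=
  let s := rule.toList
  String.mk (s.take (altLoop s 0 none 0))

-- ===== PRECONDITION & SPEC =====
def Spec_rstrip_unescaped_py (rule : String) (out : String) : Prop := out = rstrip_unescaped_py_alt rule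
instance (rule : String) (out : String) : Decidable (Spec_rstrip_unescaped_py rule out) := by unfold Spec_rstrip_unescaped_py; infer_instance

-- ===== CLAIM (what is proved, stated in full; the proofs are below) =====
def Claim_equal_rstrip_unescaped_py : Prop := ∀ (rule : String), Dom_rstrip_unescaped_py rule → Spec_rstrip_unescaped_py rule (rstrip_unescaped_py rule)

-- ===== LEMMAS AND PROOFS =====

-- "position m of s is strippable": newline/CR, or a space not escaped by a backslash.
def strippable (s : List Char) (m : Nat) : Bool :=
  s.getD m ' ' == '\n' || s.getD m ' ' == '\r' ||
    (s.getD m ' ' == ' ' && (m == 0 || s.getD (m - 1) ' ' != '\\'))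

-- the common cut point, computed from the right
def cutR (s : List Char) : Nat → Nat
  | 0 => 0
  | m + 1 => if strippable s m then cutR s m else m + 1

theorem rstripLoopA_backslash (s : List Char) (m last : Nat)
    (h : s.getD m ' ' = '\\') : rstripLoopA s (m + 1) last = last := by
  simp only [rstripLoopA]
  rw [if_neg (by rw [h]; decide), if_pos (by rw [h]; decide)]

theorem rstripLoopA_eq_cutR (s : List Char) : ∀ m, rstripLoopA s m m = cutR s m := by
  intro m
  induction m with
  | zero => simp [rstripLoopA, cutR]
  | succ m ih =>
    simp only [rstripLoopA, cutR]
    by_cases h1 : s.getD m ' ' = '\n' ∨ s.getD m ' ' = '\r'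
    · have hstr : strippable s m = true := by
        rcases h1 with h | h <;> simp_all [strippable]
      rw [if_pos h1, if_pos hstr, ih]
    · rw [if_neg h1]
      push_neg at h1
      obtain ⟨h1n, h1r⟩ := h1
      by_cases hsp : s.getD m ' ' = ' '
      · rw [if_neg (not_not_intro hsp)]
        by_cases hesc : m = 0 ∨ s.getD (m - 1) ' ' ≠ '\\'
        · have hstr : strippable s m = true := by
            rcases hesc with h | h <;> simp_all [strippable]
          rw [if_pos hesc, if_pos hstr, ih]
        · have h0 : m ≠ 0 := fun h => hesc (Or.inl h)
          have hbs : s.getD (m - 1) ' ' = '\\' := by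
            by_contra h; exact hesc (Or.inr h)
          have hstr : strippable s m = false := by simp_all [strippable]
          rw [if_neg hesc, if_neg (show ¬ strippable s m = true by simp [hstr])]
          obtain ⟨m', rfl⟩ := Nat.exists_eq_succ_of_ne_zero h0
          exact rstripLoopA_backslash s m' (m' + 1 + 1) (by simpa using hbs)
      · have hstr : strippable s m = false := by simp_all [strippable]
        rw [if_pos hsp, if_neg (show ¬ strippable s m = true by simp [hstr])]

-- the previous-character seen by B's loop after processing l, starting from prev
def prevOf (l : List Char) (prev : Option Char) : Option Char :=
  match l.getLast? with
  | some x => some x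
  | none => prev

theorem prevOf_cons (d : Char) (rest : List Char) (prev : Option Char) :
    prevOf (d :: rest) prev = prevOf rest (some d) := by
  cases rest with
  | nil => simp [prevOf]
  | cons e t =>
    cases h : (e :: t).getLast? with
    | none => exact absurd h (by simp)
    | some x => simp [prevOf, List.getLast?_cons_cons, h]

theorem altLoop_snoc (c : Char) : ∀ (l : List Char) (i : Nat) (prev : Option Char) (keep : Nat),
    altLoop (l ++ [c]) i prev keep =
      (if (c ≠ ' ' ∧ c ≠ '\r' ∧ c ≠ '\n') ∨ (c = ' ' ∧ prevOf l prev = some '\\')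
       then i + l.length + 1 else altLoop l i prev keep) := by
  intro l
  induction l with
  | nil => intro i prev keep; simp [altLoop, prevOf]
  | cons d rest ih =>
    intro i prev keep
    simp only [List.cons_append, altLoop]
    rw [ih, prevOf_cons, List.length_cons]
    split_ifs <;> first | rfl | omega

theorem take_concat_getD (s : List Char) (m : Nat) (hlt : m < s.length) :
    s.take (m + 1) = s.take m ++ [s.getD m ' '] := by
  rw [List.take_add_one]
  simp [List.getElem?_eq_getElem hlt, List.getD]

theorem prevOf_take (s : List Char) (m : Nat) (hlt : m < s.length) :
    prevOf (s.take (m + 1)) none = some (s.getD m ' ') := by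
  rw [take_concat_getD s m hlt]
  simp [prevOf, List.getLast?_concat]

-- B's loop condition versus the strippable test, at the character level
theorem cond_of_strip_false (c p : Char) (m : Nat)
    (h : (c == '\n' || c == '\r' || (c == ' ' && (m == 0 || p != '\\'))) = false) :
    (c ≠ ' ' ∧ c ≠ '\r' ∧ c ≠ '\n') ∨
      (c = ' ' ∧ (if m = 0 then (none : Option Char) else some p) = some '\\') := by
  by_cases h1 : c = ' ' <;> by_cases h0 : m = 0 <;> simp_all

theorem cond_of_strip_true (c p : Char) (m : Nat)
    (h : (c == '\n' || c == '\r' || (c == ' ' && (m == 0 || p != '\\'))) = true) :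
    ¬ ((c ≠ ' ' ∧ c ≠ '\r' ∧ c ≠ '\n') ∨
      (c = ' ' ∧ (if m = 0 then (none : Option Char) else some p) = some '\\')) := by
  by_cases h1 : c = ' ' <;> by_cases h0 : m = 0 <;> simp_all <;> tauto

theorem altLoop_take_eq_cutR (s : List Char) : ∀ m, m ≤ s.length →
    altLoop (s.take m) 0 none 0 = cutR s m := by
  intro m
  induction m with
  | zero => simp [altLoop, cutR]
  | succ m ih =>
    intro hm
    have hm' : m ≤ s.length := by omega
    have hlt : m < s.length := by omega
    rw [take_concat_getD s m hlt, altLoop_snoc, ih hm']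
    have hprev : prevOf (s.take m) none =
        if m = 0 then (none : Option Char) else some (s.getD (m - 1) ' ') := by
      cases m with
      | zero => simp [prevOf]
      | succ k => simp [prevOf_take s k (by omega)]
    rw [hprev]
    have hlen : (s.take m).length = m := by simp; omega
    simp only [cutR, hlen, Nat.zero_add]
    rcases Bool.eq_false_or_eq_true (strippable s m) with hstr | hstr
    · have hstr' := hstr
      unfold strippable at hstr'
      rw [if_neg (cond_of_strip_true _ _ _ hstr'), if_pos hstr]
    · have hstr' := hstr
      unfold strippable at hstr'
      rw [if_pos (cond_of_strip_false _ _ _ hstr'),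
        if_neg (show ¬ strippable s m = true by simp [hstr])]

-- ===== VERDICT (by name: the statement is the Claim_ definition above) =====
theorem rstrip_unescaped_py_spec : Claim_equal_rstrip_unescaped_py := by
  intro rule _
  unfold Spec_rstrip_unescaped_py rstrip_unescaped_py rstrip_unescaped_py_alt
  have hA := rstripLoopA_eq_cutR rule.toList rule.toList.length
  have hB := altLoop_take_eq_cutR rule.toList rule.toList.length (le_refl _)
  rw [List.take_length] at hB
  simp only [hA, hB]
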